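-- pv_equiv track=rewrite | github.com/HieuBuiATTT/Python-Ptit | PY01027.py | check
-- ===== SOURCE A (Python) =====
-- def check(n):
--     i = 0
--     while i < len(n):
--         if n[i] == '6':
--             if i + 1 < len(n) and n[i+1] == '8':
--                 if i + 2 < len(n) and n[i+2] == '8':
--                     i+=3
--                 else:
--                     i+=2
--             else:
--                 i+=1
--         else:
--             return "NO"
--     return "YES"
-- ===== SOURCE B (Python) =====
-- def check(n):
--     ok = all(c in "68" for c in n) and not n.startswith("8") and "888" not in n
--     return "YES" if ok else "NO"
-- ===== Notes on version B (the rewrite author's own statement) =====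
-- stated objective: idiomatic
-- what changed: Replaces the greedy index-advancing token loop with a declarative characterisation: the string decomposes into 6/68/688 tokens iff every char is 6 or 8, it does not start with 8, and it has no 888 substring.
import Mathlib
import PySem

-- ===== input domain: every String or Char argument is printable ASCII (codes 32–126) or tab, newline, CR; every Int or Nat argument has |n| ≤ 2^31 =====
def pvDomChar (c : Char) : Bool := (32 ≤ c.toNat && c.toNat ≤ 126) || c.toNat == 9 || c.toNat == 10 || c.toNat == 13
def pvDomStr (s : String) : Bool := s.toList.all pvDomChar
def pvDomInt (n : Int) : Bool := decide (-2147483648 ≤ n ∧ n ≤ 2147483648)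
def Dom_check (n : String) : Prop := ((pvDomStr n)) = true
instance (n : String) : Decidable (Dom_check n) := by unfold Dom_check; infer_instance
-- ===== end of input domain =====

-- B changes A's greedy index-advancing loop into a declarative three-condition scan (idiomatic, same cost).

-- ===== PORT A =====
-- A's while loop reads n[i], n[i+1], n[i+2] and advances i by 1/2/3; transliterated as
-- structural recursion on the suffix of characters starting at i (the lookaheads become
-- pattern matches on the next one/two characters, in the same branch order).
def checkLoop : List Char → String
  | [] => "YES"
  | '6' :: '8' :: '8' :: rest3 => checkLoop rest3   -- i += 3
  | '6' :: '8' :: rest2 => checkLoop rest2          -- i += 2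
  | '6' :: rest => checkLoop rest                   -- i += 1
  | _ :: _ => "NO"                                  -- n[i] != '6'


def check (n : String) : String := checkLoop n.toList

-- ===== PORT B =====
-- all(c in "68" for c in n)
def allSixEight (l : List Char) : Bool := l.all (fun c => c = '6' || c = '8')
-- n.startswith("8") on a one-char prefix
def startsEight : List Char → Bool
  | '8' :: _ => true
  | _ => false
-- '"888" in n' (Python substring containment, hand-ported: scans each position; exact)
def has888 : List Char → Bool
  | '8' :: '8' :: '8' :: _ => true
  | _ :: t => has888 t
  | [] => false

def check_alt (n : String) : String :=
  let l := n.toList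
  if allSixEight l && !startsEight l && !has888 l then "YES" else "NO"

-- ===== PRECONDITION & SPEC =====
def Spec_check (n : String) (out : String) : Prop := out = check_alt n
instance (n : String) (out : String) : Decidable (Spec_check n out) := by unfold Spec_check; infer_instance

-- ===== CLAIM (what is proved, stated in full; the proofs are below) =====
def Claim_equal_check : Prop := ∀ (n : String), Dom_check n → Spec_check n (check n)

-- ===== LEMMAS AND PROOFS =====

theorem checkLoop_eq (l : List Char) :
    checkLoop l = (if allSixEight l && !startsEight l && !has888 l then "YES" else "NO") := by
  fun_induction checkLoop l with
  | case1 => simp [allSixEight, startsEight, has888]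
  | case2 rest3 ih =>
    -- '6' :: '8' :: '8' :: rest3 (i += 3)
    rw [ih]
    rcases rest3 with _ | ⟨d, t⟩
    · simp [allSixEight, startsEight, has888]
    · by_cases hd : d = '8'
      · subst hd; simp [allSixEight, startsEight, has888]
      · simp [allSixEight, startsEight, has888, hd]
  | case3 rest2 hne ih =>
    -- '6' :: '8' :: rest2, rest2 does not start with '8' (i += 2)
    rw [ih]
    rcases rest2 with _ | ⟨d, t⟩
    · simp [allSixEight, startsEight, has888]
    · have hd : d ≠ '8' := by intro hd; subst hd; exact hne t rfl
      simp [allSixEight, startsEight, has888, hd]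
  | case4 rest h1 h2 ih =>
    -- '6' :: rest, rest does not start with '8' (i += 1)
    rw [ih]
    rcases rest with _ | ⟨d, t⟩
    · simp [allSixEight, startsEight, has888]
    · have hd : d ≠ '8' := by intro hd; subst hd; exact h2 t rfl
      simp [allSixEight, startsEight, has888, hd]
  | case5 c rest h1 h2 h3 =>
    -- c ≠ '6': A returns "NO"; B: either c ∉ {6,8} or c = '8' starts the string
    have h6 : c ≠ '6' := fun h => h3 h
    by_cases h8 : c = '8'
    · subst h8; simp [allSixEight, startsEight]
    · simp [allSixEight, startsEight, h6, h8]

-- ===== VERDICT (by name: the statement is the Claim_ definition above) =====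
theorem check_spec : Claim_equal_check := by
  intro n _
  unfold Spec_check check check_alt
  exact checkLoop_eq n.toList
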